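-- pv_equiv track=rewrite | github.com/ckoons/BubbleSpacetimeTheory | play/toy_261_convergent_diagnosis.py | unit_propagation
-- ===== SOURCE A (Python) =====
-- def unit_propagation(n, clauses):
--     """Run unit propagation. Return number of variables determined."""
--     assignment = {}
--     clause_list = [list(c) for c in clauses]
--     changed = True
--     while changed:
--         changed = False
--         for clause in clause_list:
--             # Remove falsified literals
--             remaining = [(v, s) for v, s in clause if v not in assignment
--                          or assignment[v] == s]
--             if len(remaining) == 0:
--                 continue  # clause satisfied or empty
--             unassigned = [(v, s) for v, s in remaining if v not in assignment]
--             if len(unassigned) == 1: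
--                 v, s = unassigned[0]
--                 if v not in assignment:
--                     assignment[v] = s
--                     changed = True
--     return len(assignment)
-- ===== SOURCE B (Python) =====
-- def unit_propagation(n, clauses):
--     """Run unit propagation. Return number of variables determined.
--
--     Queue-based single-pass closure: per-clause counters of occurrences of
--     still-undetermined variables, plus a variable -> clause-occurrence index,
--     so each literal occurrence is touched O(1) times.
--     """
--     clause_lits = [list(c) for c in clauses]
--     cnt = [len(c) for c in clause_lits]
--     occ = {}
--     for i, c in enumerate(clause_lits):
--         for v, s in c:
--             occ.setdefault(v, []).append(i)
--     assigned = set()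
--     queue = [i for i, k in enumerate(cnt) if k == 1]
--     qi = 0
--     while qi < len(queue):
--         i = queue[qi]
--         qi += 1
--         if cnt[i] == 1:
--             v = next(v for v, s in clause_lits[i] if v not in assigned)
--             assigned.add(v)
--             for j in occ[v]:
--                 cnt[j] -= 1
--                 if cnt[j] == 1:
--                     queue.append(j)
--     return len(assigned)
-- ===== Notes on version B (the rewrite author's own statement) =====
-- stated objective: faster
-- what changed: A repeatedly re-scans every clause (rebuilding the 'remaining' and 'unassigned' lists each pass) until a whole pass changes nothing; B runs a single worklist closure with per-clause counters of undetermined literal occurrences and a variable-to-clause-occurrence index, touching each literal occurrence O(1) times.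
import Mathlib
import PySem

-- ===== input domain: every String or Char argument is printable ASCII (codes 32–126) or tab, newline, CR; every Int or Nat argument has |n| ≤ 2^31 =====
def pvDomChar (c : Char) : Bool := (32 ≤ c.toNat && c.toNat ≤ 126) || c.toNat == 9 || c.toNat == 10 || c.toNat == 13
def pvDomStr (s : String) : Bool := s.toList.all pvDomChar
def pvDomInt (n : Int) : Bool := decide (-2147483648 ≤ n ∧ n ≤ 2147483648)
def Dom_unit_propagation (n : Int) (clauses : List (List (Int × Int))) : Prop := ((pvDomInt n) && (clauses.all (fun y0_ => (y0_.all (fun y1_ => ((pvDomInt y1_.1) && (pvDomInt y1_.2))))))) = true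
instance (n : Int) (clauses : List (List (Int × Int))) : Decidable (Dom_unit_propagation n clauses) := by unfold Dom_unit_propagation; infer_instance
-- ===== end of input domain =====

-- B replaces A's repeated full passes over all clauses with a single worklist closure:
-- per-clause counters of not-yet-determined literal occurrences plus a
-- variable→clause-occurrence index, instead of rescanning every clause after each change.

-- ===== PORT A =====
-- one iteration of A's inner `for clause in clause_list` body
def upStep (st : PySem.Dict Int Int × Bool) (clause : List (Int × Int)) :
    PySem.Dict Int Int × Bool :=
  let remaining := clause.filter (fun l => !(st.1.contains l.1) || (st.1.get? l.1 == some l.2))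
  if remaining.length = 0 then st
  else
    let unassigned := remaining.filter (fun l => !(st.1.contains l.1))
    match unassigned with
    | [l] => if !(st.1.contains l.1) then (st.1.insert l.1 l.2, true) else st
    | _ => st

-- A's `while changed` loop.  The fuel (total number of literals + 1) is a
-- totalization guard only: every pass that sets `changed` strictly enlarges the
-- assignment, whose keys are variables of the clauses, so the fuel is never exhausted.
def upLoop (clause_list : List (List (Int × Int))) :
    Nat → PySem.Dict Int Int → PySem.Dict Int Int
  | 0, assignment => assignment
  | fuel+1, assignment =>
    match clause_list.foldl upStep (assignment, false) with
    | (a', true) => upLoop clause_list fuel a'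
    | (a', false) => a'

def unit_propagation (n : Int) (clauses : List (List (Int × Int))) : Int :=
  let clause_list := clauses.map (fun c => c)
  ((upLoop clause_list ((clause_list.map List.length).sum + 1) PySem.Dict.empty).size : Int)

-- ===== PORT B =====
-- body of B's `for j in occ[v]` loop: decrement the clause counter, enqueue on hitting 1
def bInner (p : List Int × List Nat) (j : Nat) : List Int × List Nat :=
  let cnt' := p.1.set j (p.1.getD j 0 - 1)
  if cnt'.getD j 0 = 1 then (cnt', p.2 ++ [j]) else (cnt', p.2)

-- B's occ dict: for each (clause, index) and each literal, occ.setdefault(v, []).append(i)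
def bOcc (clause_lits : List (List (Int × Int))) : PySem.Dict Int (List Nat) :=
  clause_lits.zipIdx.foldl
    (fun d ci => ci.1.foldl (fun d l => d.modify l.1 [] (fun js => js ++ [ci.2])) d)
    PySem.Dict.empty

-- B's `while qi < len(queue)` loop.  Fuel = len(clauses) + total literals + 1 bounds the
-- final queue length, so it is never exhausted.  Python's `next(...)` always finds a
-- literal here (the counter says one occurrence is undetermined); the `none` arm is
-- unreachable and merely skips.
def bLoop (clause_lits : List (List (Int × Int))) (occ : PySem.Dict Int (List Nat)) :
    Nat → List Int → PySem.Set Int → List Nat → Nat → PySem.Set Int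
  | 0, _, assigned, _, _ => assigned
  | fuel+1, cnt, assigned, queue, qi =>
    if h : qi < queue.length then
      let i := queue[qi]
      if cnt.getD i 0 = 1 then
        match (clause_lits.getD i []).find? (fun l => !(assigned.contains l.1)) with
        | some l =>
          let assigned' := PySem.Set.add assigned l.1
          let p := ((occ.getD l.1 []).foldl bInner (cnt, queue))
          bLoop clause_lits occ fuel p.1 assigned' p.2 (qi+1)
        | none => bLoop clause_lits occ fuel cnt assigned queue (qi+1)
      else bLoop clause_lits occ fuel cnt assigned queue (qi+1)
    else assigned

def unit_propagation_alt (n : Int) (clauses : List (List (Int × Int))) : Int :=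
  let clause_lits := clauses.map (fun c => c)
  let cnt : List Int := clause_lits.map (fun c => (c.length : Int))
  let occ := bOcc clause_lits
  let queue := (cnt.zipIdx.filter (fun p => p.1 == (1 : Int))).map (fun p => p.2)
  PySem.Set.len (bLoop clause_lits occ
    (clause_lits.length + (clause_lits.map List.length).sum + 1) cnt PySem.Set.empty queue 0)

-- ===== PRECONDITION & SPEC =====
def Spec_unit_propagation (n : Int) (clauses : List (List (Int × Int))) (out : Int) : Prop := out = unit_propagation_alt n clauses
instance (n : Int) (clauses : List (List (Int × Int))) (out : Int) : Decidable (Spec_unit_propagation n clauses out) := by unfold Spec_unit_propagation; infer_instance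

-- ===== CLAIM (what is proved, stated in full; the proofs are below) =====
def Claim_equal_unit_propagation : Prop := ∀ (n : Int) (clauses : List (List (Int × Int))), Dom_unit_propagation n clauses → Spec_unit_propagation n clauses (unit_propagation n clauses)

-- ===== LEMMAS AND PROOFS =====

-- number of literal occurrences of `c` whose variable is not yet determined (not in S)
def uCount (S : List Int) (c : List (Int × Int)) : Nat :=
  (c.filter (fun l => decide (l.1 ∉ S))).length

-- the variables any run of this propagation rule must determine:
-- v is forced by a clause in which it occurs exactly once and all other variables are forced
inductive Forced (cl : List (List (Int × Int))) : Int → Prop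
  | mk (v : Int) (c : List (Int × Int)) (hc : c ∈ cl)
      (hcount : (c.map Prod.fst).count v = 1)
      (hrest : ∀ l ∈ c, l.1 ≠ v → Forced cl l.1) : Forced cl v

-- S is saturated: no clause has exactly one undetermined occurrence left
def IsFix (cl : List (List (Int × Int))) (S : List Int) : Prop :=
  ∀ c ∈ cl, uCount S c ≠ 1

def allVars (cl : List (List (Int × Int))) : List Int :=
  cl.flatMap (fun c => c.map Prod.fst)

def SCount (cl : List (List (Int × Int))) (S : List Int) : Nat :=
  (cl.map (fun c => uCount S c)).sum

def occTotal (cl : List (List (Int × Int))) (v : Int) : Nat :=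
  (cl.map (fun c => (c.map Prod.fst).count v)).sum

lemma not_contains_list (S : List Int) (x : Int) :
    (!(S.contains x)) = decide (x ∉ S) := by simp

lemma not_contains_dict (d : PySem.Dict Int Int) (k : Int) :
    (!(d.contains k)) = decide (k ∉ d.keys) := by
  by_cases h : k ∈ d.keys
  · simp [h, (PySem.Dict.contains_iff_mem_keys d k).2 h]
  · have hc : d.contains k ≠ true := fun hc => h ((PySem.Dict.contains_iff_mem_keys d k).1 hc)
    simp [h, Bool.not_eq_true] at hc ⊢
    simp [hc]

lemma forced_of_filter_singleton {cl : List (List (Int × Int))} {S : List Int}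
    {c : List (Int × Int)} {l0 : Int × Int}
    (hS : ∀ u ∈ S, Forced cl u) (hc : c ∈ cl)
    (hf : c.filter (fun l => decide (l.1 ∉ S)) = [l0]) : Forced cl l0.1 := by
  have hl0f : l0 ∈ c.filter (fun l => decide (l.1 ∉ S)) := by
    rw [hf]; exact List.mem_singleton_self l0
  have hl0mem : l0 ∈ c := List.mem_of_mem_filter hl0f
  have hl0S : l0.1 ∉ S := by simpa using List.of_mem_filter hl0f
  refine Forced.mk l0.1 c hc ?_ ?_
  · have hfe : c.filter (fun l => decide (l.1 ∉ S)) = c.filter (fun l => l.1 == l0.1) := by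
      apply List.filter_congr
      intro l hl
      by_cases h1 : l.1 = l0.1
      · simp [h1, hl0S]
      · by_cases h2 : l.1 ∈ S
        · simp [h1, h2]
        · exfalso
          have : l ∈ c.filter (fun l => decide (l.1 ∉ S)) := List.mem_filter.2 ⟨hl, by simpa⟩
          rw [hf, List.mem_singleton] at this
          exact h1 (by rw [this])
    rw [List.count_eq_countP, List.countP_map]
    have : (c.countP ((fun x => x == l0.1) ∘ Prod.fst)) = (c.filter (fun l => l.1 == l0.1)).length := by
      rw [List.countP_eq_length_filter]; rfl
    rw [this, ← hfe, hf]; rfl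
  · intro l hl hne
    by_cases h2 : l.1 ∈ S
    · exact hS l.1 h2
    · exfalso
      have : l ∈ c.filter (fun l => decide (l.1 ∉ S)) := List.mem_filter.2 ⟨hl, by simpa⟩
      rw [hf, List.mem_singleton] at this
      exact hne (by rw [this])

lemma forced_mem_of_fix {cl : List (List (Int × Int))} {F : List Int}
    (hfix : IsFix cl F) : ∀ v, Forced cl v → v ∈ F := by
  intro v h
  induction h with
  | mk v c hc hcount hrest ih =>
    by_cases hv : v ∈ F
    · exact hv
    · exfalso
      apply hfix c hc
      have hfe : c.filter (fun l => decide (l.1 ∉ F)) = c.filter (fun l => l.1 == v) := by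
        apply List.filter_congr
        intro l hl
        by_cases h1 : l.1 = v
        · simp [h1, hv]
        · simp [h1, ih l hl h1]
      unfold uCount
      rw [hfe, ← List.countP_eq_length_filter]
      rw [List.count_eq_countP, List.countP_map] at hcount
      exact hcount

lemma length_eq_of_sound_fix {cl : List (List (Int × Int))} {S T : List Int}
    (hSnd : S.Nodup) (hTnd : T.Nodup)
    (hS1 : ∀ u ∈ S, Forced cl u) (hS2 : IsFix cl S)
    (hT1 : ∀ u ∈ T, Forced cl u) (hT2 : IsFix cl T) : S.length = T.length :=
  ((List.perm_ext_iff_of_nodup hSnd hTnd).2 (fun a =>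
    ⟨fun h => forced_mem_of_fix hT2 a (hS1 a h),
     fun h => forced_mem_of_fix hS2 a (hT1 a h)⟩)).length_eq

-- ---- A-side ----

lemma upStep_insert {d : PySem.Dict Int Int} {ch : Bool} {c : List (Int × Int)}
    {l0 : Int × Int} (h : c.filter (fun l => decide (l.1 ∉ d.keys)) = [l0]) :
    upStep (d, ch) c = (d.insert l0.1 l0.2, true) := by
  have hb : (fun l : Int × Int => !(d.contains l.1)) = (fun l => decide (l.1 ∉ d.keys)) :=
    funext (fun l => not_contains_dict d l.1)
  have hff : (c.filter (fun l => !(d.contains l.1) || (d.get? l.1 == some l.2))).filter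
      (fun l => !(d.contains l.1)) = c.filter (fun l => !(d.contains l.1)) := by
    rw [List.filter_filter]
    apply List.filter_congr
    intro l _
    cases hd : d.contains l.1 <;> simp [hd]
  have hfc : c.filter (fun l => !(d.contains l.1)) = [l0] := by rw [hb]; exact h
  have hl0 : l0 ∈ c.filter (fun l => !(d.contains l.1)) := by
    rw [hfc]; exact List.mem_singleton_self l0
  have hcont : (!(d.contains l0.1)) = true := (List.mem_filter.1 hl0).2
  have hl0r : l0 ∈ c.filter (fun l => !(d.contains l.1) || (d.get? l.1 == some l.2)) :=
    List.mem_filter.2 ⟨List.mem_of_mem_filter hl0, by simp [hcont]⟩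
  have hlenne : ¬ ((c.filter (fun l => !(d.contains l.1) || (d.get? l.1 == some l.2))).length = 0) := by
    intro hlen
    rw [List.length_eq_zero_iff] at hlen
    rw [hlen] at hl0r
    exact List.not_mem_nil hl0r
  simp only [upStep]
  rw [if_neg hlenne, hff, hfc]
  simp [hcont]

lemma upStep_skip {d : PySem.Dict Int Int} {ch : Bool} {c : List (Int × Int)}
    (h : ∀ l0, c.filter (fun l => decide (l.1 ∉ d.keys)) ≠ [l0]) :
    upStep (d, ch) c = (d, ch) := by
  have hb : (fun l : Int × Int => !(d.contains l.1)) = (fun l => decide (l.1 ∉ d.keys)) :=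
    funext (fun l => not_contains_dict d l.1)
  have hff : (c.filter (fun l => !(d.contains l.1) || (d.get? l.1 == some l.2))).filter
      (fun l => !(d.contains l.1)) = c.filter (fun l => !(d.contains l.1)) := by
    rw [List.filter_filter]
    apply List.filter_congr
    intro l _
    cases hd : d.contains l.1 <;> simp [hd]
  simp only [upStep]
  by_cases hlen : (c.filter (fun l => !(d.contains l.1) || (d.get? l.1 == some l.2))).length = 0
  · rw [if_pos hlen]
  · rw [if_neg hlen, hff]
    rcases hsh : c.filter (fun l => !(d.contains l.1)) with _ | ⟨a, _ | ⟨b, t⟩⟩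
    · rw [hsh]
    · exact absurd (show c.filter (fun l => decide (l.1 ∉ d.keys)) = [a] by
        rw [← hb]; exact hsh) (h a)
    · rw [hsh]

lemma pass_true (cs : List (List (Int × Int))) :
    ∀ d, (cs.foldl upStep (d, true)).2 = true := by
  induction cs with
  | nil => intro d; rfl
  | cons c cs ih =>
    intro d
    rw [List.foldl_cons]
    rcases hsh : c.filter (fun l => decide (l.1 ∉ d.keys)) with _ | ⟨a, _ | ⟨b, t⟩⟩
    · rw [upStep_skip (fun l0 => by rw [hsh]; simp)]; exact ih d
    · rw [upStep_insert hsh]; exact ih _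
    · rw [upStep_skip (fun l0 => by rw [hsh]; simp)]; exact ih d

lemma pass_false :
    ∀ (cs : List (List (Int × Int))) (d : PySem.Dict Int Int),
      (cs.foldl upStep (d, false)).2 = false →
      (cs.foldl upStep (d, false)).1 = d ∧ ∀ c ∈ cs, uCount d.keys c ≠ 1 := by
  intro cs
  induction cs with
  | nil => intro d _; exact ⟨rfl, by simp⟩
  | cons c cs ih =>
    intro d h
    rw [List.foldl_cons] at h ⊢
    rcases hsh : c.filter (fun l => decide (l.1 ∉ d.keys)) with _ | ⟨a, _ | ⟨b, t⟩⟩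
    · rw [upStep_skip (fun l0 => by rw [hsh]; simp)] at h ⊢
      obtain ⟨h1, h2⟩ := ih d h
      refine ⟨h1, ?_⟩
      intro c' hc'
      rcases List.mem_cons.1 hc' with rfl | hc'
      · unfold uCount; rw [hsh]; simp
      · exact h2 c' hc'
    · rw [upStep_insert hsh] at h
      exact absurd (pass_true cs _) (by rw [h]; simp)
    · rw [upStep_skip (fun l0 => by rw [hsh]; simp)] at h ⊢
      obtain ⟨h1, h2⟩ := ih d h
      refine ⟨h1, ?_⟩
      intro c' hc'
      rcases List.mem_cons.1 hc' with rfl | hc'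
      · unfold uCount; rw [hsh]; simp
      · exact h2 c' hc'

lemma pass_spec (cl : List (List (Int × Int))) :
    ∀ (cs : List (List (Int × Int))) (d : PySem.Dict Int Int) (ch : Bool),
      (∀ c ∈ cs, c ∈ cl) → d.keys.Nodup → (∀ u ∈ d.keys, Forced cl u) →
      (∀ u ∈ d.keys, u ∈ allVars cl) →
      (cs.foldl upStep (d, ch)).1.keys.Nodup ∧
      (∀ u ∈ (cs.foldl upStep (d, ch)).1.keys, Forced cl u) ∧
      (∀ u ∈ (cs.foldl upStep (d, ch)).1.keys, u ∈ allVars cl) ∧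
      d.size ≤ (cs.foldl upStep (d, ch)).1.size ∧
      ((cs.foldl upStep (d, ch)).2 = ch ∨ d.size < (cs.foldl upStep (d, ch)).1.size) := by
  intro cs
  induction cs with
  | nil => intro d ch _ hnd hfor hsub; exact ⟨hnd, hfor, hsub, le_refl _, Or.inl rfl⟩
  | cons c cs ih =>
    intro d ch hcs hnd hfor hsub
    rw [List.foldl_cons]
    rcases hsh : c.filter (fun l => decide (l.1 ∉ d.keys)) with _ | ⟨a, _ | ⟨b, t⟩⟩
    · rw [upStep_skip (fun l0 => by rw [hsh]; simp)]
      exact ih d ch (fun c' hc' => hcs c' (List.mem_cons_of_mem c hc')) hnd hfor hsub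
    · rw [upStep_insert hsh]
      have hamem : a ∈ c.filter (fun l => decide (l.1 ∉ d.keys)) := by
        rw [hsh]; exact List.mem_singleton_self a
      have hanotin : a.1 ∉ d.keys := by simpa using (List.mem_filter.1 hamem).2
      have hancont : d.contains a.1 = false := by
        have := not_contains_dict d a.1
        simp [hanotin] at this
        simpa using this
      have hnd' : (d.insert a.1 a.2).keys.Nodup := PySem.Dict.nodup_keys_insert d a.1 a.2 hnd
      have hsz : (d.insert a.1 a.2).size = d.size + 1 := by
        rw [PySem.Dict.size_insert]; simp [hancont]
      have hfa : Forced cl a.1 :=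
        forced_of_filter_singleton hfor (hcs c (List.mem_cons_self)) hsh
      have hfor' : ∀ u ∈ (d.insert a.1 a.2).keys, Forced cl u := by
        intro u hu
        rcases (PySem.Dict.mem_keys_insert d a.1 u a.2).1 hu with rfl | hu
        · exact hfa
        · exact hfor u hu
      have hsub' : ∀ u ∈ (d.insert a.1 a.2).keys, u ∈ allVars cl := by
        intro u hu
        rcases (PySem.Dict.mem_keys_insert d a.1 u a.2).1 hu with rfl | hu
        · exact List.mem_flatMap.2 ⟨c, hcs c List.mem_cons_self,
            List.mem_map.2 ⟨a, List.mem_of_mem_filter hamem, rfl⟩⟩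
        · exact hsub u hu
      obtain ⟨p1, p2, p3, p4, p5⟩ :=
        ih (d.insert a.1 a.2) true (fun c' hc' => hcs c' (List.mem_cons_of_mem c hc')) hnd' hfor' hsub'
      refine ⟨p1, p2, p3, by omega, Or.inr (by omega)⟩
    · rw [upStep_skip (fun l0 => by rw [hsh]; simp)]
      exact ih d ch (fun c' hc' => hcs c' (List.mem_cons_of_mem c hc')) hnd hfor hsub

lemma size_eq_keys_length (d : PySem.Dict Int Int) : d.size = d.keys.length := by
  simp [PySem.Dict.size, PySem.Dict.keys]

lemma keys_length_le {d : PySem.Dict Int Int} {A : List Int}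
    (hnd : d.keys.Nodup) (hsub : ∀ u ∈ d.keys, u ∈ A) : d.keys.length ≤ A.length :=
  calc d.keys.length = d.keys.toFinset.card := (List.toFinset_card_of_nodup hnd).symm
    _ ≤ A.toFinset.card := Finset.card_le_card
        (fun u hu => List.mem_toFinset.2 (hsub u (List.mem_toFinset.1 hu)))
    _ ≤ A.length := List.toFinset_card_le A

lemma upLoop_spec (cl : List (List (Int × Int))) :
    ∀ (fuel : Nat) (d : PySem.Dict Int Int),
      d.keys.Nodup → (∀ u ∈ d.keys, Forced cl u) → (∀ u ∈ d.keys, u ∈ allVars cl) →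
      (allVars cl).length + 1 ≤ d.size + fuel →
      (upLoop cl fuel d).keys.Nodup ∧
      (∀ u ∈ (upLoop cl fuel d).keys, Forced cl u) ∧
      IsFix cl (upLoop cl fuel d).keys := by
  intro fuel
  induction fuel with
  | zero =>
    intro d hnd hfor hsub hfuel
    exfalso
    have h1 : d.size = d.keys.length := size_eq_keys_length d
    have h2 : d.keys.length ≤ (allVars cl).length := keys_length_le hnd hsub
    omega
  | succ fuel ih =>
    intro d hnd hfor hsub hfuel
    have hps := pass_spec cl cl d false (fun _ hc => hc) hnd hfor hsub
    rcases hres : cl.foldl upStep (d, false) with ⟨d', b⟩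
    rw [hres] at hps
    cases b with
    | false =>
      have hpf := pass_false cl d (by rw [hres])
      rw [hres] at hpf
      have hd' : d' = d := hpf.1
      simp only [upLoop, hres]
      rw [hd']
      exact ⟨hnd, hfor, hpf.2⟩
    | true =>
      simp only [upLoop, hres]
      have hlt : d.size < d'.size := by
        rcases hps.2.2.2.2 with h | h
        · simp at h
        · exact h
      exact ih d' hps.1 hps.2.1 hps.2.2.1 (by omega)

-- ---- B-side ----

lemma uCount_cons (S : List Int) (l : Int × Int) (c : List (Int × Int)) :
    uCount S (l :: c) = (if l.1 ∈ S then 0 else 1) + uCount S c := by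
  unfold uCount
  rw [List.filter_cons]
  by_cases h : l.1 ∈ S <;> simp [h] <;> omega

lemma uCount_append {S : List Int} {v : Int} (hv : v ∉ S) (c : List (Int × Int)) :
    (c.map Prod.fst).count v ≤ uCount S c ∧
    uCount (S ++ [v]) c = uCount S c - (c.map Prod.fst).count v := by
  induction c with
  | nil => simp [uCount]
  | cons l c ih =>
    obtain ⟨ih1, ih2⟩ := ih
    rw [List.map_cons, List.count_cons, uCount_cons, uCount_cons]
    by_cases h1 : l.1 = v
    · simp [h1, hv]
      omega
    · by_cases h2 : l.1 ∈ S
      · have h3 : l.1 ∈ S ++ [v] := by simp [h2]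
        simp [h1, h2, h3]
        omega
      · have h3 : l.1 ∉ S ++ [v] := by simp [h1, h2]
        simp [h1, h2, h3]
        omega

lemma uCount_nil (c : List (Int × Int)) : uCount [] c = c.length := by
  simp [uCount]

lemma SCount_append {cl : List (List (Int × Int))} {S : List Int} {v : Int} (hv : v ∉ S) :
    occTotal cl v ≤ SCount cl S ∧
    SCount cl (S ++ [v]) = SCount cl S - occTotal cl v := by
  induction cl with
  | nil => simp [SCount, occTotal]
  | cons c cl ih =>
    obtain ⟨ih1, ih2⟩ := ih
    obtain ⟨h1, h2⟩ := uCount_append hv c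
    unfold SCount occTotal at *
    simp only [List.map_cons, List.sum_cons]
    omega

lemma allVars_length (cl : List (List (Int × Int))) :
    (allVars cl).length = (cl.map List.length).sum := by
  simp [allVars, List.length_flatMap]

lemma SCount_nil (cl : List (List (Int × Int))) :
    SCount cl [] = (cl.map List.length).sum := by
  unfold SCount
  congr 1
  exact List.map_congr_left (fun c _ => uCount_nil c)

lemma occ_getD (cl : List (List (Int × Int))) (v : Int) :
    (bOcc cl).getD v [] =
      ((cl.zipIdx.flatMap (fun ci => ci.1.map (fun l => (l.1, ci.2)))).filter
        (fun p => p.1 == v)).map (fun p => p.2) := by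
  have h1 : bOcc cl = ((cl.zipIdx.flatMap (fun ci => ci.1.map (fun l => (l.1, ci.2)))).foldl
      (fun d p => d.modify p.1 [] (fun js => js ++ [p.2])) PySem.Dict.empty) := by
    rw [List.foldl_flatMap]
    unfold bOcc
    congr 1
    funext d ci
    rw [List.foldl_map]
  rw [h1, PySem.Dict.getD_foldl_modify_append]
  rw [PySem.Dict.getD_empty]
  rfl

lemma occ_mem {cl : List (List (Int × Int))} {v : Int} {j : Nat}
    (h : j ∈ (bOcc cl).getD v []) : j < cl.length := by
  rw [occ_getD] at h
  obtain ⟨p, hp, hpj⟩ := List.mem_map.1 h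
  have hpP := List.mem_of_mem_filter hp
  obtain ⟨ci, hci, hpci⟩ := List.mem_flatMap.1 hpP
  obtain ⟨l, _, hl⟩ := List.mem_map.1 hpci
  have hidx := List.mem_zipIdx hci
  have : p.2 = ci.2 := by rw [← hl]
  omega

lemma zipIdx_sum_zero (f : List (Int × Int) → Nat) :
    ∀ (cl : List (List (Int × Int))) (k j : Nat), j < k →
      ((cl.zipIdx k).map (fun ci => if ci.2 = j then f ci.1 else 0)).sum = 0 := by
  intro cl
  induction cl with
  | nil => intro k j _; rfl
  | cons c cl ih =>
    intro k j hjk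
    rw [List.zipIdx_cons, List.map_cons, List.sum_cons, if_neg (by omega), ih (k+1) j (by omega)]

lemma zipIdx_sum_pick (f : List (Int × Int) → Nat) :
    ∀ (cl : List (List (Int × Int))) (k j : Nat), k ≤ j → (hj : j - k < cl.length) →
      ((cl.zipIdx k).map (fun ci => if ci.2 = j then f ci.1 else 0)).sum = f cl[j - k] := by
  intro cl
  induction cl with
  | nil => intro k j _ hj; simp at hj
  | cons c cl ih =>
    intro k j hk hj
    rw [List.zipIdx_cons, List.map_cons, List.sum_cons]
    by_cases hkj : k = j
    · rw [if_pos hkj, zipIdx_sum_zero f cl (k+1) j (by omega)]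
      have : j - k = 0 := by omega
      simp [this]
    · have hj' : j - (k+1) < cl.length := by simp at hj; omega
      have hrec := ih (k+1) j (by omega) hj'
      rw [if_neg hkj, hrec]
      have h2 : (c :: cl)[j - k] = cl[j - (k+1)] := by
        have h1 : j - k = (j - (k+1)) + 1 := by omega
        simp only [h1, List.getElem_cons_succ]
      rw [h2, Nat.zero_add]

lemma occ_count (cl : List (List (Int × Int))) (v : Int) (j : Nat) (hj : j < cl.length) :
    ((bOcc cl).getD v []).count j = (cl[j].map Prod.fst).count v := by
  rw [occ_getD]
  rw [List.count_eq_countP, List.countP_map, List.countP_filter, List.countP_flatMap]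
  have hmap : ∀ ci : List (Int × Int) × Nat,
      (List.countP (fun a => ((fun x => x == j) ∘ fun p => p.2) a && (fun p => p.1 == v) a) ∘
        fun ci => ci.1.map (fun l => (l.1, ci.2))) ci
      = (fun ci : List (Int × Int) × Nat => if ci.2 = j then (ci.1.map Prod.fst).count v else 0) ci := by
    intro ci
    simp only [Function.comp_apply, List.countP_map]
    by_cases h : ci.2 = j
    · rw [if_pos h]
      rw [List.count_eq_countP, List.countP_map]
      apply List.countP_congr
      intro l _
      simp [h]
    · rw [if_neg h]
      rw [List.countP_eq_zero]
      intro l _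
      simp [h]
  rw [List.map_congr_left (fun ci _ => hmap ci)]
  have := zipIdx_sum_pick (fun c => (c.map Prod.fst).count v) cl 0 j (by omega) (by simpa)
  simpa using this

lemma occ_len (cl : List (List (Int × Int))) (v : Int) :
    ((bOcc cl).getD v []).length = occTotal cl v := by
  rw [occ_getD, List.length_map, ← List.countP_eq_length_filter, List.countP_flatMap]
  have hmap : ∀ ci : List (Int × Int) × Nat,
      (List.countP (fun p => p.1 == v) ∘ fun ci : List (Int × Int) × Nat =>
        ci.1.map (fun l => (l.1, ci.2))) ci
      = (fun c : List (Int × Int) => (c.map Prod.fst).count v) ci.1 := by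
    intro ci
    simp only [Function.comp_apply, List.countP_map]
    rw [List.count_eq_countP, List.countP_map]
    rfl
  rw [List.map_congr_left (fun ci _ => hmap ci)]
  unfold occTotal
  conv_rhs => rw [← List.zipIdx_map_fst 0 cl, List.map_map]
  rfl

lemma getD_set_int (cnt : List Int) (j k : Nat) (x : Int) (hj : j < cnt.length) :
    (cnt.set j x).getD k 0 = if k = j then x else cnt.getD k 0 := by
  simp only [List.getD_eq_getElem?_getD, List.getElem?_set]
  by_cases h : k = j
  · simp [h, hj]
  · simp [h, Ne.symm h]

lemma bInner_fold (js : List Nat) :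
    ∀ (cnt : List Int) (queue : List Nat), (∀ j ∈ js, j < cnt.length) →
    ∃ ext : List Nat,
      (js.foldl bInner (cnt, queue)).2 = queue ++ ext ∧
      ext.length ≤ js.length ∧ (∀ k ∈ ext, k ∈ js) ∧
      (js.foldl bInner (cnt, queue)).1.length = cnt.length ∧
      (∀ k : Nat, (js.foldl bInner (cnt, queue)).1.getD k 0
          = cnt.getD k 0 - (js.count k : Int)) ∧
      (∀ k ∈ js, (js.foldl bInner (cnt, queue)).1.getD k 0 = 1 → k ∈ ext) := by
  induction js with
  | nil =>
    intro cnt queue _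
    exact ⟨[], by simp, by simp, by simp, rfl, by simp, by simp⟩
  | cons j js ih =>
    intro cnt queue hlt
    have hjlen : j < cnt.length := hlt j List.mem_cons_self
    rw [List.foldl_cons]
    have hget1 : ∀ k, (cnt.set j (cnt.getD j 0 - 1)).getD k 0
        = if k = j then cnt.getD j 0 - 1 else cnt.getD k 0 := fun k =>
      getD_set_int cnt j k _ hjlen
    have hc1len : (cnt.set j (cnt.getD j 0 - 1)).length = cnt.length := by simp
    have hlt' : ∀ m ∈ js, m < (cnt.set j (cnt.getD j 0 - 1)).length := by
      rw [hc1len]; exact fun m hm => hlt m (List.mem_cons_of_mem j hm)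
    by_cases hhit : (cnt.set j (cnt.getD j 0 - 1)).getD j 0 = 1
    · have hstep : bInner (cnt, queue) j = (cnt.set j (cnt.getD j 0 - 1), queue ++ [j]) := by
        simp only [bInner]
        rw [if_pos hhit]
      rw [hstep]
      obtain ⟨ext, e1, e2, e3, e4, e5, e6⟩ := ih (cnt.set j (cnt.getD j 0 - 1)) (queue ++ [j]) hlt'
      refine ⟨j :: ext, ?_, ?_, ?_, ?_, ?_, ?_⟩
      · rw [e1, List.append_assoc]; rfl
      · simp; omega
      · intro k hk
        rcases List.mem_cons.1 hk with rfl | hk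
        · exact List.mem_cons_self
        · exact List.mem_cons_of_mem j (e3 k hk)
      · rw [e4, hc1len]
      · intro k
        rw [e5 k, hget1 k, List.count_cons]
        by_cases hkj : k = j
        · simp [hkj]; omega
        · simp [hkj, Ne.symm hkj]
      · intro k hk hone
        rcases List.mem_cons.1 hk with rfl | hk
        · exact List.mem_cons_self
        · exact List.mem_cons_of_mem j (e6 k hk hone)
    · have hstep : bInner (cnt, queue) j = (cnt.set j (cnt.getD j 0 - 1), queue) := by
        simp only [bInner]
        rw [if_neg hhit]
      rw [hstep]
      obtain ⟨ext, e1, e2, e3, e4, e5, e6⟩ := ih (cnt.set j (cnt.getD j 0 - 1)) queue hlt'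
      refine ⟨ext, e1, by simp; omega, fun k hk => List.mem_cons_of_mem j (e3 k hk), by rw [e4, hc1len], ?_, ?_⟩
      · intro k
        rw [e5 k, hget1 k, List.count_cons]
        by_cases hkj : k = j
        · simp [hkj]; omega
        · simp [hkj, Ne.symm hkj]
      · intro k hk hone
        rcases List.mem_cons.1 hk with rfl | hk
        · by_cases hkin : k ∈ js
          · exact e6 k hkin hone
          · exfalso
            apply hhit
            have h5 := e5 k
            rw [hget1 k, if_pos rfl, List.count_eq_zero_of_not_mem hkin] at h5
            rw [hget1 k, if_pos rfl]
            rw [h5] at hone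
            omega
        · exact e6 k hk hone

lemma bLoop_spec (cl : List (List (Int × Int))) :
    ∀ (fuel : Nat) (cnt : List Int) (assigned : PySem.Set Int)
      (queue : List Nat) (qi : Nat),
      assigned.Nodup → (∀ v ∈ assigned, Forced cl v) →
      cnt.length = cl.length →
      (∀ (j : Nat) (hj : j < cl.length), cnt.getD j 0 = (uCount assigned cl[j] : Int)) →
      (∀ (j : Nat) (hj : j < cl.length), uCount assigned cl[j] = 1 → j ∈ queue.drop qi) →
      (∀ j ∈ queue, j < cl.length) →
      queue.length - qi + SCount cl assigned ≤ fuel →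
      (bLoop cl (bOcc cl) fuel cnt assigned queue qi).Nodup ∧
      (∀ v ∈ bLoop cl (bOcc cl) fuel cnt assigned queue qi, Forced cl v) ∧
      IsFix cl (bLoop cl (bOcc cl) fuel cnt assigned queue qi) := by
  intro fuel
  induction fuel with
  | zero =>
    intro cnt assigned queue qi hnd hfor hlen hcnt hq hqlt hfuel
    refine ⟨hnd, hfor, ?_⟩
    intro c hc huc
    obtain ⟨j, hj, rfl⟩ := List.mem_iff_getElem.1 hc
    have hmem := hq j hj huc
    rw [List.drop_eq_nil_of_le (by omega)] at hmem
    exact List.not_mem_nil hmem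
  | succ fuel ih =>
    intro cnt assigned queue qi hnd hfor hlen hcnt hq hqlt hfuel
    by_cases hqi : qi < queue.length
    · have hi : queue[qi] < cl.length := hqlt queue[qi] (List.getElem_mem hqi)
      by_cases hhit : cnt.getD queue[qi] 0 = 1
      · -- popped clause is unit: the loop assigns its last undetermined variable
        have huc : uCount assigned cl[queue[qi]] = 1 := by
          have := hcnt queue[qi] hi
          rw [this] at hhit
          exact_mod_cast hhit
        obtain ⟨l0, hl0⟩ := List.length_eq_one_iff.1 huc
        have hl0f : l0 ∈ cl[queue[qi]].filter (fun l => decide (l.1 ∉ assigned)) := by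
          rw [hl0]; exact List.mem_singleton_self l0
        have hl0c : l0 ∈ cl[queue[qi]] := List.mem_of_mem_filter hl0f
        have hl0not : l0.1 ∉ assigned := by simpa using (List.mem_filter.1 hl0f).2
        have hfind : (cl.getD queue[qi] []).find? (fun l => !(PySem.Set.contains assigned l.1))
            = some l0 := by
          rw [List.getD_eq_getElem cl [] hi]
          have hpred : (fun l : Int × Int => !(PySem.Set.contains assigned l.1))
              = (fun l : Int × Int => decide (l.1 ∉ assigned)) := by
            funext l
            rw [PySem.Set.contains_eq_listContains]
            exact not_contains_list assigned l.1
          rw [hpred, ← List.head?_filter, hl0]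
          rfl
        have hloop : bLoop cl (bOcc cl) (fuel+1) cnt assigned queue qi
            = bLoop cl (bOcc cl) fuel
                (((bOcc cl).getD l0.1 []).foldl bInner (cnt, queue)).1
                (PySem.Set.add assigned l0.1)
                (((bOcc cl).getD l0.1 []).foldl bInner (cnt, queue)).2 (qi+1) := by
          simp only [bLoop]
          rw [dif_pos hqi, if_pos hhit, hfind]
        rw [hloop]
        have hadd : PySem.Set.add assigned l0.1 = assigned ++ [l0.1] :=
          PySem.Set.add_of_not_mem hl0not
        obtain ⟨ext, e1, e2, e3, e4, e5, e6⟩ :=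
          bInner_fold ((bOcc cl).getD l0.1 []) cnt queue
            (fun j hj => by rw [hlen]; exact occ_mem hj)
        obtain ⟨sa1, sa2⟩ := SCount_append (cl := cl) hl0not
        have hforced0 : Forced cl l0.1 :=
          forced_of_filter_singleton hfor (List.getElem_mem hi) hl0
        have hnd' : (assigned ++ [l0.1]).Nodup := by
          simp [List.nodup_append, hnd]
          exact fun a ha hal => hl0not (hal ▸ ha)
        have hfor' : ∀ v ∈ assigned ++ [l0.1], Forced cl v := by
          intro v hv
          rcases List.mem_append.1 hv with hv | hv
          · exact hfor v hv
          · rw [List.mem_singleton.1 hv]; exact hforced0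
        have hcnt' : ∀ (j : Nat) (hj : j < cl.length),
            (((bOcc cl).getD l0.1 []).foldl bInner (cnt, queue)).1.getD j 0
              = (uCount (assigned ++ [l0.1]) cl[j] : Int) := by
          intro j hj
          rw [e5 j, hcnt j hj, occ_count cl l0.1 j hj]
          obtain ⟨u1, u2⟩ := uCount_append hl0not cl[j]
          rw [u2]
          omega
        have hdropapp : (queue ++ ext).drop (qi+1) = queue.drop (qi+1) ++ ext :=
          List.drop_append_of_le_length (by omega)
        have hq' : ∀ (j : Nat) (hj : j < cl.length),
            uCount (assigned ++ [l0.1]) cl[j] = 1 →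
            j ∈ (((bOcc cl).getD l0.1 []).foldl bInner (cnt, queue)).2.drop (qi+1) := by
          intro j hj huc'
          rw [e1, hdropapp]
          by_cases hcj : (cl[j].map Prod.fst).count l0.1 = 0
          · obtain ⟨u1, u2⟩ := uCount_append hl0not cl[j]
            rw [u2, hcj, Nat.sub_zero] at huc'
            have hmem := hq j hj huc'
            rw [List.drop_eq_getElem_cons hqi] at hmem
            rcases List.mem_cons.1 hmem with heq | hmem
            · exfalso
              have hpos : 0 < (cl[j].map Prod.fst).count l0.1 := by
                subst heq
                exact List.count_pos_iff.2 (List.mem_map.2 ⟨l0, hl0c, rfl⟩)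
              omega
            · exact List.mem_append_left ext hmem
          · have hjin : j ∈ (bOcc cl).getD l0.1 [] := by
              have : 0 < ((bOcc cl).getD l0.1 []).count j := by
                rw [occ_count cl l0.1 j hj]
                omega
              exact List.count_pos_iff.1 this
            have h1 : (((bOcc cl).getD l0.1 []).foldl bInner (cnt, queue)).1.getD j 0 = 1 := by
              rw [hcnt' j hj, huc']
              rfl
            exact List.mem_append_right _ (e6 j hjin h1)
        have hqlt' : ∀ j ∈ (((bOcc cl).getD l0.1 []).foldl bInner (cnt, queue)).2,
            j < cl.length := by
          intro j hj
          rw [e1] at hj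
          rcases List.mem_append.1 hj with hj | hj
          · exact hqlt j hj
          · exact occ_mem (e3 j hj)
        have hocclen : ((bOcc cl).getD l0.1 []).length = occTotal cl l0.1 := occ_len cl l0.1
        have hfuel' : (((bOcc cl).getD l0.1 []).foldl bInner (cnt, queue)).2.length - (qi+1)
            + SCount cl (assigned ++ [l0.1]) ≤ fuel := by
          rw [e1, List.length_append, sa2]
          omega
        have := ih (((bOcc cl).getD l0.1 []).foldl bInner (cnt, queue)).1
          (assigned ++ [l0.1]) (((bOcc cl).getD l0.1 []).foldl bInner (cnt, queue)).2 (qi+1)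
          hnd' hfor' (by rw [e4, hlen]) hcnt' hq' hqlt' hfuel'
        rw [hadd]
        exact this
      · -- popped clause is no longer unit: skip
        have hloop : bLoop cl (bOcc cl) (fuel+1) cnt assigned queue qi
            = bLoop cl (bOcc cl) fuel cnt assigned queue (qi+1) := by
          simp only [bLoop]
          rw [dif_pos hqi, if_neg hhit]
        rw [hloop]
        apply ih cnt assigned queue (qi+1) hnd hfor hlen hcnt _ hqlt (by omega)
        intro j hj huc
        have hmem := hq j hj huc
        rw [List.drop_eq_getElem_cons hqi] at hmem
        rcases List.mem_cons.1 hmem with heq | hmem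
        · exfalso
          apply hhit
          have h2 := hcnt j hj
          rw [huc] at h2
          rw [← heq]
          exact h2
        · exact hmem
    · have hloop : bLoop cl (bOcc cl) (fuel+1) cnt assigned queue qi = assigned := by
        simp only [bLoop]
        rw [dif_neg hqi]
      rw [hloop]
      refine ⟨hnd, hfor, ?_⟩
      intro c hc huc
      obtain ⟨j, hj, rfl⟩ := List.mem_iff_getElem.1 hc
      have hmem := hq j hj huc
      rw [List.drop_eq_nil_of_le (by omega)] at hmem
      exact List.not_mem_nil hmem

-- ===== VERDICT (by name: the statement is the Claim_ definition above) =====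
theorem unit_propagation_spec : Claim_equal_unit_propagation := by
  unfold Claim_equal_unit_propagation
  intro n clauses _
  unfold Spec_unit_propagation
  have key : ∀ cl : List (List (Int × Int)),
      ((upLoop cl ((cl.map List.length).sum + 1) PySem.Dict.empty).size : Int)
      = PySem.Set.len (bLoop cl (bOcc cl) (cl.length + (cl.map List.length).sum + 1)
          (cl.map (fun c => (c.length : Int))) PySem.Set.empty
          (((cl.map (fun c => (c.length : Int))).zipIdx.filter
            (fun p => p.1 == (1 : Int))).map (fun p => p.2)) 0) := by
    intro cl
    obtain ⟨ha1, ha2, ha3⟩ := upLoop_spec cl ((cl.map List.length).sum + 1) PySem.Dict.empty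
      (by simp [PySem.Dict.keys_empty])
      (by simp [PySem.Dict.keys_empty])
      (by simp [PySem.Dict.keys_empty])
      (by rw [allVars_length, PySem.Dict.size_empty]; omega)
    set cnt0 := cl.map (fun c => (c.length : Int)) with hcnt0def
    set q0 := (cnt0.zipIdx.filter (fun p => p.1 == (1 : Int))).map (fun p => p.2) with hq0def
    have hlen0 : cnt0.length = cl.length := by rw [hcnt0def]; simp
    have hcntj : ∀ (j : Nat) (hj : j < cl.length), cnt0.getD j 0 = (uCount [] cl[j] : Int) := by
      intro j hj
      rw [uCount_nil, hcnt0def, List.getD_eq_getElem _ _ (by simpa)]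
      simp
    have hq0mem : ∀ (j : Nat) (hj : j < cl.length),
        uCount ([] : List Int) cl[j] = 1 → j ∈ q0.drop 0 := by
      intro j hj h1
      rw [uCount_nil] at h1
      rw [List.drop_zero, hq0def]
      apply List.mem_map.2
      refine ⟨((cl[j].length : Int), j), List.mem_filter.2 ⟨?_, ?_⟩, rfl⟩
      · apply List.mem_zipIdx_iff_getElem?.2
        rw [hcnt0def]
        simp [List.getElem?_eq_getElem hj]
      · simp [h1]
    have hq0lt : ∀ j ∈ q0, j < cl.length := by
      intro j hj
      rw [hq0def] at hj
      obtain ⟨p, hp, hpj⟩ := List.mem_map.1 hj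
      have hpz : (p.1, p.2) ∈ cnt0.zipIdx := by
        rw [Prod.mk.eta]; exact List.mem_of_mem_filter hp
      have := List.mem_zipIdx hpz
      omega
    have hfuel0 : q0.length - 0 + SCount cl [] ≤ cl.length + (cl.map List.length).sum + 1 := by
      have hqlen : q0.length ≤ cl.length := by
        rw [hq0def]
        calc ((cnt0.zipIdx.filter (fun p => p.1 == (1 : Int))).map (fun p => p.2)).length
            = (cnt0.zipIdx.filter (fun p => p.1 == (1 : Int))).length := by rw [List.length_map]
          _ ≤ cnt0.zipIdx.length := List.length_filter_le _ _
          _ = cnt0.length := List.length_zipIdx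
          _ = cl.length := hlen0
      rw [SCount_nil]
      omega
    obtain ⟨hb1, hb2, hb3⟩ := bLoop_spec cl (cl.length + (cl.map List.length).sum + 1)
      cnt0 PySem.Set.empty q0 0
      List.nodup_nil (by simp [PySem.Set.empty]) hlen0 hcntj hq0mem hq0lt hfuel0
    have hleneq := length_eq_of_sound_fix ha1 hb1 ha2 ha3 hb2 hb3
    rw [size_eq_keys_length]
    unfold PySem.Set.len
    rw [hleneq]
  exact key (clauses.map (fun c => c))
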